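-- pv_equiv track=rewrite | github.com/kirin765/japantravel | src/japantravel/scheduler/jobs.py | _derive_business_status
-- ===== SOURCE A (Python) =====
-- from typing import Any, Callable, Dict, List, Mapping, Optional
--
-- def _derive_business_status(places: Any) -> str:
--     if not isinstance(places, list) or not places:
--         return "unknown"
--     statuses = []
--     for item in places:
--         if not isinstance(item, Mapping):
--             continue
--         status = str(item.get("business_status") or item.get("businessStatus") or "").strip().lower()
--         if status:
--             statuses.append(status)
--     if not statuses:
--         return "unknown"
--     if all(status == statuses[0] for status in statuses):
--         return statuses[0]
--     return "mixed"
-- ===== SOURCE B (Python) =====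
-- from typing import Any, Mapping
--
-- def _derive_business_status(places: Any) -> str:
--     if not isinstance(places, list) or not places:
--         return "unknown"
--     first = None
--     for item in places:
--         if not isinstance(item, Mapping):
--             continue
--         status = str(item.get("business_status") or item.get("businessStatus") or "").strip().lower()
--         if not status:
--             continue
--         if first is None:
--             first = status
--         elif status != first:
--             return "mixed"
--     return first if first is not None else "unknown"
-- ===== Notes on version B (the rewrite author's own statement) =====
-- stated objective: alternative
-- what changed: B replaces A's collect-all-statuses list plus a second all()-equal scan by a single pass tracking only the first status seen, returning 'mixed' early at the first disagreement and never building a list.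
import Mathlib
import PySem

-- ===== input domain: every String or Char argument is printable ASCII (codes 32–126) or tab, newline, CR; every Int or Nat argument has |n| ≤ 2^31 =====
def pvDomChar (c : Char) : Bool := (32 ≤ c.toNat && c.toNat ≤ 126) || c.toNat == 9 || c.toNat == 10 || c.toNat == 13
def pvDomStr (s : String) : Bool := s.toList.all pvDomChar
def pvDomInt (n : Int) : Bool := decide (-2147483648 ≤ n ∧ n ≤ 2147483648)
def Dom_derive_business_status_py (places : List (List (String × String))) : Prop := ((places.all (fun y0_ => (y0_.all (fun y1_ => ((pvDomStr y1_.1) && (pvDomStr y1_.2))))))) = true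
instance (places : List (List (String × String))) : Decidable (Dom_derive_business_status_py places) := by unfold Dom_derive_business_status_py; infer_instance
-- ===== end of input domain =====

-- B replaces A's collect-all-statuses list plus a second all()-equal scan by a single
-- pass tracking only the first status seen, with an early 'mixed' return (alternative, O(1) extra space).

-- shared helper: the status expression both Pythons contain verbatim:
-- str(item.get("business_status") or item.get("businessStatus") or "").strip().lower()
def pvStatus (item : List (String × String)) : String :=
  let d : PySem.Dict String String := PySem.Dict.mk item
  let raw := (d.get? "business_status").getD ""   -- None and "" are both falsy, so getD "" is exact
  let raw := if raw ≠ "" then raw else (d.get? "businessStatus").getD ""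
  PySem.Str.lower (PySem.Str.strip raw)

-- ===== PORT A =====
def derive_business_status_py (places : List (List (String × String))) : String :=
  if places = [] then "unknown"
  else
    let statuses := places.foldl (fun acc item =>
      let status := pvStatus item
      if status ≠ "" then acc ++ [status] else acc) []
    match statuses with
    | [] => "unknown"
    | s0 :: rest => if (s0 :: rest).all (fun s => s == s0) then s0 else "mixed"

-- ===== PORT B =====
def pvAltLoop (first : Option String) : List (List (String × String)) → String
  | [] => first.getD "unknown"
  | item :: rest =>
    let status := pvStatus item
    if status = "" then pvAltLoop first rest
    else
      match first with
      | none => pvAltLoop (some status) rest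
      | some f => if status = f then pvAltLoop first rest else "mixed"

def derive_business_status_py_alt (places : List (List (String × String))) : String :=
  if places = [] then "unknown" else pvAltLoop none places

-- ===== PRECONDITION & SPEC =====
def Spec_derive_business_status_py (places : List (List (String × String))) (out : String) : Prop := out = derive_business_status_py_alt places
instance (places : List (List (String × String))) (out : String) : Decidable (Spec_derive_business_status_py places out) := by unfold Spec_derive_business_status_py; infer_instance

-- ===== CLAIM (what is proved, stated in full; the proofs are below) =====
def Claim_equal_derive_business_status_py : Prop := ∀ (places : List (List (String × String))), Dom_derive_business_status_py places → Spec_derive_business_status_py places (derive_business_status_py places)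

-- ===== LEMMAS AND PROOFS =====

-- the list of nonempty normalized statuses
def pvStat (places : List (List (String × String))) : List String :=
  (places.map pvStatus).filter (fun s => s ≠ "")

theorem pvFoldA (places : List (List (String × String))) (acc : List String) :
    places.foldl (fun acc item =>
      let status := pvStatus item
      if status ≠ "" then acc ++ [status] else acc) acc = acc ++ pvStat places := by
  induction places generalizing acc with
  | nil => simp [pvStat]
  | cons p ps ih =>
    rw [List.foldl_cons, ih]
    by_cases h : pvStatus p = "" <;> simp [pvStat, h]

-- pvAltLoop as a fold over the status list
def pvGo (first : Option String) : List String → String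
  | [] => first.getD "unknown"
  | s :: l =>
    match first with
    | none => pvGo (some s) l
    | some f => if s = f then pvGo (some f) l else "mixed"

theorem pvAltLoop_eq_go (places : List (List (String × String))) (first : Option String) :
    pvAltLoop first places = pvGo first (pvStat places) := by
  induction places generalizing first with
  | nil => cases first <;> simp [pvAltLoop, pvStat, pvGo]
  | cons p ps ih =>
    simp only [pvAltLoop, pvStat, List.map_cons, List.filter_cons]
    by_cases h : pvStatus p = ""
    · simp [h, ih, pvStat]
    · cases first with
      | none => simp [h, ih, pvStat, pvGo]
      | some f =>
        by_cases hf : pvStatus p = f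
        · have hfne : f ≠ "" := hf ▸ h
          simp [hf, hfne, ih, pvStat, pvGo]
        · simp [h, hf, pvGo]

theorem pvGo_some (l : List String) (f : String) :
    pvGo (some f) l = if l.all (fun s => s == f) then f else "mixed" := by
  induction l with
  | nil => simp [pvGo]
  | cons s l ih =>
    by_cases h : s = f
    · simp [pvGo, h, ih]
    · simp [pvGo, h]

-- ===== VERDICT (by name: the statement is the Claim_ definition above) =====
theorem derive_business_status_py_spec : Claim_equal_derive_business_status_py := by
  intro places _
  unfold Spec_derive_business_status_py derive_business_status_py derive_business_status_py_alt
  by_cases hp : places = []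
  · simp [hp]
  · simp only [hp, ite_false]
    rw [pvFoldA places [], List.nil_append, pvAltLoop_eq_go]
    cases h : pvStat places with
    | nil => simp [pvGo]
    | cons s0 rest =>
      simp only [pvGo, pvGo_some, List.all_cons, beq_self_eq_true, Bool.true_and]
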